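-- pv_equiv track=rewrite | github.com/Byson-source/ros_src | src/cpp/scripts/feature_matching.py | choose_image
-- ===== SOURCE A (Python) =====
-- def choose_image(list_ind, list_val):
--     initial_ind = list_ind[0]
--     initial_val = list_val[0]
--
--     go_past_num = 6
--
--     for i in range(len(list_ind)):
--         if i > 0:
--             initial_ind -= 2*go_past_num
--             initial_val -= 2*go_past_num
--             list_ind[i] = initial_ind
--             list_val[i] = initial_val
--
--     return list_ind, list_val
-- ===== SOURCE B (Python) =====
-- def choose_image(list_ind, list_val):
--     n = len(list_ind)
--     base_ind = list_ind[0]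
--     base_val = list_val[0]
--     list_ind[1:n] = [base_ind - 12 * i for i in range(1, n)]
--     list_val[1:n] = [base_val - 12 * i for i in range(1, n)]
--     return list_ind, list_val
-- ===== Notes on version B (the rewrite author's own statement) =====
-- stated objective: simpler
-- what changed: Replaced the per-iteration running accumulator (initial -= 12 each step, then elementwise store) with a single closed-form slice assignment list[1:n] = [first - 12*i for i in range(1, n)] on each list.
import Mathlib
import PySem

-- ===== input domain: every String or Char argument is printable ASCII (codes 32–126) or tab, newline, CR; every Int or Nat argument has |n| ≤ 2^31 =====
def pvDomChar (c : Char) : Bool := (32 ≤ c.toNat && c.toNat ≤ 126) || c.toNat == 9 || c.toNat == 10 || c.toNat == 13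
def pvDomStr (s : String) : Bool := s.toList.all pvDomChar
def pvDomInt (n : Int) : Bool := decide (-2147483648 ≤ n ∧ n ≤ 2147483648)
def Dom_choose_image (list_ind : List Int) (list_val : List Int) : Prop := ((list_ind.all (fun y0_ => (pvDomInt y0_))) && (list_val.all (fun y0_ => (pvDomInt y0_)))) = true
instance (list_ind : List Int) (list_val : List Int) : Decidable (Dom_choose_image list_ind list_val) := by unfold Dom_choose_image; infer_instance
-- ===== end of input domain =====

-- B replaces A's running accumulator with a closed-form slice assignment (objective: simpler).
-- Both Pythons mutate the argument lists in place identically on Pre_; the theorems are about the return value.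

-- ===== PORT A =====
-- loop body of 'for i in range(len(list_ind))': state = ((initial_ind, initial_val), (list_ind, list_val))
def pvStepA (st : (Int × Int) × List Int × List Int) (i : Int) : (Int × Int) × List Int × List Int :=
  if i > 0 then
    let ii := st.1.1 - 2 * 6   -- go_past_num = 6
    let iv := st.1.2 - 2 * 6
    ((ii, iv), st.2.1.set i.toNat ii, st.2.2.set i.toNat iv)
  else st

def choose_image (list_ind : List Int) (list_val : List Int) : List Int × List Int :=
  -- list_ind[0] / list_val[0]: Python raises IndexError on []; Pre_ excludes that, so getD is exact on Pre_
  let initial_ind := PySem.List.pyGetD list_ind 0 0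
  let initial_val := PySem.List.pyGetD list_val 0 0
  let r := (PySem.List.pyRange 0 list_ind.length 1).foldl pvStepA ((initial_ind, initial_val), list_ind, list_val)
  (r.2.1, r.2.2)

-- ===== PORT B =====
-- slice assignment xs[1:n] = seg is exactly xs.take 1 ++ seg ++ xs.drop n (here n = list_ind.length)
def choose_image_alt (list_ind : List Int) (list_val : List Int) : List Int × List Int :=
  let n := list_ind.length
  let base_ind := PySem.List.pyGetD list_ind 0 0   -- list_ind[0]; raises on [] in Python, excluded by Pre_
  let base_val := PySem.List.pyGetD list_val 0 0
  let li' := list_ind.take 1 ++ (PySem.List.pyRange 1 n 1).map (fun i => base_ind - 12 * i) ++ list_ind.drop n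
  let lv' := list_val.take 1 ++ (PySem.List.pyRange 1 n 1).map (fun i => base_val - 12 * i) ++ list_val.drop n
  (li', lv')

-- ===== PRECONDITION & SPEC =====
-- Exactly where the Python A returns: both lists nonempty (list_ind[0]/list_val[0]) and,
-- when list_ind has ≥ 2 elements, list_val at least as long (A writes list_val[i] for i < len(list_ind)).
def Pre_choose_image (list_ind : List Int) (list_val : List Int) : Prop :=
  list_ind ≠ [] ∧ list_val ≠ [] ∧ (list_ind.length ≤ list_val.length ∨ list_ind.length = 1)
instance (list_ind : List Int) (list_val : List Int) : Decidable (Pre_choose_image list_ind list_val) := by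
  unfold Pre_choose_image; infer_instance

def pvWitness_choose_image : List Int × List Int := ([5, 0, 0], [7, 0, 0])

def Spec_choose_image (list_ind : List Int) (list_val : List Int) (out : List Int × List Int) : Prop := out = choose_image_alt list_ind list_val
instance (list_ind : List Int) (list_val : List Int) (out : List Int × List Int) : Decidable (Spec_choose_image list_ind list_val out) := by unfold Spec_choose_image; infer_instance

-- ===== CLAIM (what is proved, stated in full; the proofs are below) =====
def Claim_equal_choose_image : Prop := ∀ (list_ind : List Int) (list_val : List Int), Dom_choose_image list_ind list_val → Pre_choose_image list_ind list_val → Spec_choose_image list_ind list_val (choose_image list_ind list_val)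

-- ===== LEMMAS AND PROOFS =====

-- invariant of A's loop over indices 1 .. m-1
theorem foldA_inv (li lv : List Int) (x0 y0 : Int) (m : Nat) (h1 : 1 ≤ m)
    (hli : m ≤ li.length) (hlv : m ≤ lv.length) :
    (PySem.List.pyRange 1 (m : Int) 1).foldl pvStepA ((x0, y0), li, lv)
      = ((x0 - 12 * ((m : Int) - 1), y0 - 12 * ((m : Int) - 1)),
         li.take 1 ++ (PySem.List.pyRange 1 (m : Int) 1).map (fun i => x0 - 12 * i) ++ li.drop m,
         lv.take 1 ++ (PySem.List.pyRange 1 (m : Int) 1).map (fun i => y0 - 12 * i) ++ lv.drop m) := by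
  induction m with
  | zero => omega
  | succ m ih =>
    by_cases hm : m = 0
    · subst hm
      rw [show ((0 + 1 : Nat) : Int) = 1 by norm_num, PySem.List.pyRange_one_eq_nil (le_refl 1)]
      simp
      constructor <;> rw [← List.drop_one] <;> exact (List.take_append_drop 1 _).symm
    · have h1m : 1 ≤ m := by omega
      have hsplit : ((m + 1 : Nat) : Int) = (m : Int) + 1 := by push_cast; ring
      rw [hsplit, PySem.List.pyRange_one_succ_right (by exact_mod_cast h1m)]
      rw [List.foldl_append, List.map_append, List.map_append,
          ih h1m (by omega) (by omega)]
      simp only [List.foldl_cons, List.foldl_nil, pvStepA]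
      have hmpos : (m : Int) > 0 := by exact_mod_cast h1m
      rw [if_pos hmpos]
      have htoNat : ((m : Int)).toNat = m := Int.toNat_natCast m
      have hlen1 : (List.take 1 li).length = 1 := by
        simp [List.length_take]; omega
      have hlen1' : (List.take 1 lv).length = 1 := by
        simp [List.length_take]; omega
      have hseglen : ((PySem.List.pyRange 1 (m : Int) 1).map (fun i => x0 - 12 * i)).length = m - 1 := by
        rw [List.length_map, PySem.List.length_pyRange_one]; omega
      have hseglen' : ((PySem.List.pyRange 1 (m : Int) 1).map (fun i => y0 - 12 * i)).length = m - 1 := by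
        rw [List.length_map, PySem.List.length_pyRange_one]; omega
      have hdropli : li.drop m = li[m] :: li.drop (m + 1) :=
        List.drop_eq_getElem_cons (by omega)
      have hdroplv : lv.drop m = lv[m] :: lv.drop (m + 1) :=
        List.drop_eq_getElem_cons (by omega)
      have hval : ∀ z : Int, z - 12 * ((m : Int) - 1) - 2 * 6 = z - 12 * (m : Int) := by
        intro z; ring
      refine Prod.ext ?_ (Prod.ext ?_ ?_) <;> simp only [Prod.mk.injEq, htoNat]
      · constructor <;> ring
      · rw [← List.append_assoc, List.set_append,
            if_neg (by rw [List.length_append, hlen1, hseglen]; omega),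
            List.length_append, hlen1, hseglen,
            show m - (1 + (m - 1)) = 0 by omega,
            hdropli, List.set_cons_zero, hval]
        simp
      · rw [← List.append_assoc, List.set_append,
            if_neg (by rw [List.length_append, hlen1', hseglen']; omega),
            List.length_append, hlen1', hseglen',
            show m - (1 + (m - 1)) = 0 by omega,
            hdroplv, List.set_cons_zero, hval]
        simp

-- ===== VERDICT (by name: the statement is the Claim_ definition above) =====
theorem choose_image_spec : Claim_equal_choose_image := by
  intro li lv _ hpre
  obtain ⟨hne, hvne, hlen⟩ := hpre
  unfold Spec_choose_image choose_image choose_image_alt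
  have hn1 : 1 ≤ li.length := List.length_pos_iff.mpr hne
  have hv1 : 1 ≤ lv.length := List.length_pos_iff.mpr hvne
  have hlv : li.length ≤ lv.length := by omega
  have hcons : PySem.List.pyRange 0 (li.length : Int) 1
      = 0 :: PySem.List.pyRange 1 (li.length : Int) 1 := by
    rw [PySem.List.pyRange_one_cons (by exact_mod_cast hn1)]
    norm_num
  have hstep0 : pvStepA ((PySem.List.pyGetD li 0 0, PySem.List.pyGetD lv 0 0), li, lv) 0
      = ((PySem.List.pyGetD li 0 0, PySem.List.pyGetD lv 0 0), li, lv) := by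
    simp [pvStepA]
  simp only [hcons, List.foldl_cons, hstep0]
  rw [foldA_inv li lv _ _ li.length hn1 (le_refl _) hlv]
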